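-- pv_equiv track=rewrite | github.com/microsoft/interwhen | examples/TTSwithVerification/verina_specgen.py | parse_spec_test_results
-- ===== SOURCE A (Python) =====
-- from typing import List, Tuple, Optional, Dict, Any
--
-- DECIDABLE_ERR_MSG = "did not evaluate to `true`"
--
-- def parse_spec_test_results(compile_output: str, marker: str, num_tests: int) -> Tuple[int, int, dict]:
--     """Parse compilation output for spec test results."""
--     test_results = {}
--
--     if "error" not in compile_output.lower():
--         for idx in range(num_tests):
--             test_results[idx] = "pass"
--         return num_tests, 0, test_results
--
--     start_marker = f"<{marker}>"
--     end_marker = f"</{marker}>"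
--
--     parts = compile_output.split(start_marker)
--     test_messages = {}
--
--     for part in parts[1:]:
--         if end_marker in part:
--             idx_str, rest = part.split(end_marker, 1)
--             try:
--                 test_idx = int(idx_str.strip().split(",")[0])
--                 test_messages[test_idx] = rest
--             except ValueError:
--                 continue
--
--     num_passed = 0
--     num_failed = 0
--
--     for idx in range(num_tests):
--         msg = test_messages.get(idx, "")
--         if DECIDABLE_ERR_MSG in msg:
--             test_results[idx] = "fail"
--             num_failed += 1
--         elif "error" in msg.lower():
--             test_results[idx] = "error"
--             num_failed += 1
--         else:
--             test_results[idx] = "pass"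
--             num_passed += 1
--
--     return num_passed, num_failed, test_results
-- ===== SOURCE B (Python) =====
-- DECIDABLE_ERR_MSG = "did not evaluate to `true`"
--
-- def _classify(body):
--     if DECIDABLE_ERR_MSG in body:
--         return "fail"
--     if "error" in body.lower():
--         return "error"
--     return "pass"
--
-- def parse_spec_test_results(compile_output, marker, num_tests):
--     if "error" not in compile_output.lower():
--         return num_tests, 0, {i: "pass" for i in range(num_tests)}
--
--     start_marker = f"<{marker}>"
--     end_marker = f"</{marker}>"
--
--     # Single streaming pass over the marked blocks: classify each in-range block
--     # immediately (no message dict), overwriting earlier classifications of the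
--     # same index while adjusting the running failure count.
--     status = {}
--     num_failed = 0
--     for part in compile_output.split(start_marker)[1:]:
--         if end_marker not in part:
--             continue
--         head, body = part.split(end_marker, 1)
--         try:
--             idx = int(head.strip().split(",")[0])
--         except ValueError:
--             continue
--         if 0 <= idx < num_tests:
--             new = _classify(body)
--             if status.get(idx, "pass") != "pass":
--                 num_failed -= 1
--             if new != "pass":
--                 num_failed += 1
--             status[idx] = new
--
--     results = {i: status.get(i, "pass") for i in range(num_tests)}
--     return len(results) - num_failed, num_failed, results
-- ===== Notes on version B (the rewrite author's own statement) =====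
-- stated objective: alternative
-- what changed: A stages the work: it first builds an index->message dict from the split blocks and then loops over every index in range(num_tests) classifying each message with inline pass/fail counters; B never builds a message dict or classification loop over range - it classifies each in-range block in one streaming pass, overwriting earlier classifications of a duplicate index while adjusting a running failure count, and only assembles the all-pass-defaulted result dict at the end.
import Mathlib
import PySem

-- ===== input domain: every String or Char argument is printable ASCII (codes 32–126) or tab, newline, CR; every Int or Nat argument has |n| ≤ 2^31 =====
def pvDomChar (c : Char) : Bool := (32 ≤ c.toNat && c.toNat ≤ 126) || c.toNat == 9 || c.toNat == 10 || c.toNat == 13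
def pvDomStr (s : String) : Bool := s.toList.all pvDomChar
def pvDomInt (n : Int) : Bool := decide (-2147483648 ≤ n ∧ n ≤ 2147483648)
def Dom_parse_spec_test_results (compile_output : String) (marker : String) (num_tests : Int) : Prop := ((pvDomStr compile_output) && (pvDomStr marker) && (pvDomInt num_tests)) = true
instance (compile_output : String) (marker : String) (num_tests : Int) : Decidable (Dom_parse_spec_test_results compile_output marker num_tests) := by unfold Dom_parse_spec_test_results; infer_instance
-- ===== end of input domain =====

-- B replaces A's two stages (build an index->message dict from the blocks, then classify every
-- index in range(num_tests) with inline counters) by one streaming pass that classifies each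
-- in-range block on the spot, overwriting duplicates while adjusting a running failure count;
-- the message dict and the range classification loop disappear. Same cost, different structure.

def pvDECIDABLE_ERR_MSG : List Char := "did not evaluate to `true`".toList

-- generic 2-element unpacking ('a, b = xs'; any other shape falls back — unreachable here)
def pvUnpack2 {α β : Type} (l : List α) (dflt : β) (f : α → α → β) : β :=
  match l with
  | [a, b] => f a b
  | _ => dflt

-- ===== PORT A =====
def parse_spec_test_results (compile_output : String) (marker : String) (num_tests : Int) : Int × Int × (List (Int × String)) :=
  if !(PySem.Chars.isIn "error".toList (PySem.Chars.lower compile_output.toList)) then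
    let test_results : PySem.Dict Int String :=
      (PySem.List.pyRange 0 num_tests).foldl (fun d idx => d.insert idx "pass") PySem.Dict.empty
    (num_tests, 0, test_results.items)
  else
    let start_marker : List Char := '<' :: (marker.toList ++ ['>'])
    let end_marker : List Char := '<' :: '/' :: (marker.toList ++ ['>'])
    let parts := PySem.Chars.splitOn compile_output.toList start_marker
    let test_messages : PySem.Dict Int (List Char) :=
      (parts.drop 1).foldl (fun d part =>
        if PySem.Chars.isIn end_marker part then
          pvUnpack2 (PySem.Chars.splitOnMax part end_marker 1) d (fun idx_str rest =>
            -- int(idx_str.strip().split(",")[0]); ValueError → continue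
            (PySem.Int.ofChars? ((PySem.Chars.splitOn (PySem.Chars.strip idx_str) [',']).headI)).elim
              d (fun test_idx => d.insert test_idx rest))
        else d) PySem.Dict.empty
    let st := (PySem.List.pyRange 0 num_tests).foldl
      (fun (st : Int × Int × PySem.Dict Int String) idx =>
        let msg := test_messages.getD idx []
        if PySem.Chars.isIn pvDECIDABLE_ERR_MSG msg then
          (st.1, st.2.1 + 1, st.2.2.insert idx "fail")
        else if PySem.Chars.isIn "error".toList (PySem.Chars.lower msg) then
          (st.1, st.2.1 + 1, st.2.2.insert idx "error")
        else
          (st.1 + 1, st.2.1, st.2.2.insert idx "pass"))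
      (0, 0, PySem.Dict.empty)
    (st.1, st.2.1, st.2.2.items)

-- ===== PORT B =====
def pvStatus (msg : List Char) : String :=
  if PySem.Chars.isIn pvDECIDABLE_ERR_MSG msg then "fail"
  else if PySem.Chars.isIn "error".toList (PySem.Chars.lower msg) then "error"
  else "pass"

def parse_spec_test_results_alt (compile_output : String) (marker : String) (num_tests : Int) : Int × Int × (List (Int × String)) :=
  if !(PySem.Chars.isIn "error".toList (PySem.Chars.lower compile_output.toList)) then
    (num_tests, 0,
      ((PySem.List.pyRange 0 num_tests).foldl (fun d i => d.insert i "pass")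
        (PySem.Dict.empty : PySem.Dict Int String)).items)
  else
    let start_marker : List Char := '<' :: (marker.toList ++ ['>'])
    let end_marker : List Char := '<' :: '/' :: (marker.toList ++ ['>'])
    -- one streaming pass: classify each in-range block at once, overwrite + adjust the counter
    let st := ((PySem.Chars.splitOn compile_output.toList start_marker).drop 1).foldl
      (fun (st : PySem.Dict Int String × Int) part =>
        if PySem.Chars.isIn end_marker part then
          pvUnpack2 (PySem.Chars.splitOnMax part end_marker 1) st (fun head body =>
            (PySem.Int.ofChars? ((PySem.Chars.splitOn (PySem.Chars.strip head) [',']).headI)).elim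
              st (fun idx =>
                if 0 ≤ idx ∧ idx < num_tests then
                  let new := pvStatus body
                  let f1 := if st.1.getD idx "pass" != "pass" then st.2 - 1 else st.2
                  let f2 := if new != "pass" then f1 + 1 else f1
                  (st.1.insert idx new, f2)
                else st))
        else st)
      ((PySem.Dict.empty : PySem.Dict Int String), 0)
    let results : PySem.Dict Int String :=
      (PySem.List.pyRange 0 num_tests).foldl
        (fun d i => d.insert i (st.1.getD i "pass")) PySem.Dict.empty
    ((results.size : Int) - st.2, st.2, results.items)

-- ===== PRECONDITION & SPEC =====
def Spec_parse_spec_test_results (compile_output : String) (marker : String) (num_tests : Int) (out : Int × Int × (List (Int × String))) : Prop := out = parse_spec_test_results_alt compile_output marker num_tests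
instance (compile_output : String) (marker : String) (num_tests : Int) (out : Int × Int × (List (Int × String))) : Decidable (Spec_parse_spec_test_results compile_output marker num_tests out) := by unfold Spec_parse_spec_test_results; infer_instance

-- ===== CLAIM (what is proved, stated in full; the proofs are below) =====
def Claim_equal_parse_spec_test_results : Prop := ∀ (compile_output : String) (marker : String) (num_tests : Int), Dom_parse_spec_test_results compile_output marker num_tests → Spec_parse_spec_test_results compile_output marker num_tests (parse_spec_test_results compile_output marker num_tests)

-- ===== LEMMAS AND PROOFS =====

def pvBad (msg : List Char) : Bool :=
  PySem.Chars.isIn pvDECIDABLE_ERR_MSG msg || PySem.Chars.isIn "error".toList (PySem.Chars.lower msg)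

-- A's block-parsing step and its message dict, named for the proofs
def pvStepA (em : List Char) (d : PySem.Dict Int (List Char)) (part : List Char) : PySem.Dict Int (List Char) :=
  if PySem.Chars.isIn em part then
    pvUnpack2 (PySem.Chars.splitOnMax part em 1) d (fun idx_str rest =>
      (PySem.Int.ofChars? ((PySem.Chars.splitOn (PySem.Chars.strip idx_str) [',']).headI)).elim
        d (fun test_idx => d.insert test_idx rest))
  else d

def pvMsgs (c m : String) : PySem.Dict Int (List Char) :=
  ((PySem.Chars.splitOn c.toList ('<' :: (m.toList ++ ['>']))).drop 1).foldl
    (pvStepA ('<' :: '/' :: (m.toList ++ ['>']))) PySem.Dict.empty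

-- B's streaming step, named for the proofs
def pvStepB (n : Int) (em : List Char) (st : PySem.Dict Int String × Int) (part : List Char) : PySem.Dict Int String × Int :=
  if PySem.Chars.isIn em part then
    pvUnpack2 (PySem.Chars.splitOnMax part em 1) st (fun head body =>
      (PySem.Int.ofChars? ((PySem.Chars.splitOn (PySem.Chars.strip head) [',']).headI)).elim
        st (fun idx =>
          if 0 ≤ idx ∧ idx < n then
            let new := pvStatus body
            let f1 := if st.1.getD idx "pass" != "pass" then st.2 - 1 else st.2
            let f2 := if new != "pass" then f1 + 1 else f1
            (st.1.insert idx new, f2)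
          else st))
  else st

theorem pvStatus_ne_pass (msg : List Char) : (pvStatus msg != "pass") = pvBad msg := by
  by_cases h1 : PySem.Chars.isIn pvDECIDABLE_ERR_MSG msg = true
  · have hs : pvStatus msg = "fail" := by unfold pvStatus; rw [if_pos h1]
    have hb : pvBad msg = true := by unfold pvBad; rw [h1, Bool.true_or]
    rw [hs, hb]; rfl
  · rw [Bool.not_eq_true] at h1
    by_cases h2 : PySem.Chars.isIn "error".toList (PySem.Chars.lower msg) = true
    · have hs : pvStatus msg = "error" := by
        unfold pvStatus; rw [if_neg (by rw [h1]; decide), if_pos h2]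
      have hb : pvBad msg = true := by unfold pvBad; rw [h1, h2]; rfl
      rw [hs, hb]; rfl
    · rw [Bool.not_eq_true] at h2
      have hs : pvStatus msg = "pass" := by
        unfold pvStatus; rw [if_neg (by rw [h1]; decide), if_neg (by rw [h2]; decide)]
      have hb : pvBad msg = false := by unfold pvBad; rw [h1, h2]; rfl
      rw [hs, hb]; rfl

theorem pvStatus_nil : pvStatus [] = "pass" := by decide

theorem pvBad_nil : pvBad [] = false := by decide

-- A's counting loop over range, characterised (invariant of the three-accumulator fold)
theorem pvA_fold (msgs : PySem.Dict Int (List Char)) (l : List Int)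
    (np nf : Int) (tr : PySem.Dict Int String) :
    l.foldl
      (fun (st : Int × Int × PySem.Dict Int String) idx =>
        if PySem.Chars.isIn pvDECIDABLE_ERR_MSG (msgs.getD idx []) then
          (st.1, st.2.1 + 1, st.2.2.insert idx "fail")
        else if PySem.Chars.isIn "error".toList (PySem.Chars.lower (msgs.getD idx [])) then
          (st.1, st.2.1 + 1, st.2.2.insert idx "error")
        else
          (st.1 + 1, st.2.1, st.2.2.insert idx "pass"))
      (np, nf, tr)
    = (np + (l.countP (fun i => !pvBad (msgs.getD i [])) : Int),
       nf + (l.countP (fun i => pvBad (msgs.getD i [])) : Int),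
       l.foldl (fun d i => d.insert i (pvStatus (msgs.getD i []))) tr) := by
  induction l generalizing np nf tr with
  | nil => simp
  | cons x xs ih =>
    simp only [List.foldl_cons, List.countP_cons]
    by_cases h1 : PySem.Chars.isIn pvDECIDABLE_ERR_MSG (msgs.getD x []) = true
    · have hb : pvBad (msgs.getD x []) = true := by unfold pvBad; rw [h1, Bool.true_or]
      have hs : pvStatus (msgs.getD x []) = "fail" := by unfold pvStatus; rw [if_pos h1]
      rw [if_pos h1, ih]
      simp [hb, hs]
      omega
    · rw [Bool.not_eq_true] at h1
      by_cases h2 : PySem.Chars.isIn "error".toList (PySem.Chars.lower (msgs.getD x [])) = true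
      · have hb : pvBad (msgs.getD x []) = true := by unfold pvBad; rw [h1, h2]; rfl
        have hs : pvStatus (msgs.getD x []) = "error" := by
          unfold pvStatus; rw [if_neg (by rw [h1]; decide), if_pos h2]
        rw [if_neg (by rw [h1]; decide), if_pos h2, ih]
        simp [hb, hs]
        omega
      · rw [Bool.not_eq_true] at h2
        have hb : pvBad (msgs.getD x []) = false := by unfold pvBad; rw [h1, h2]; rfl
        have hs : pvStatus (msgs.getD x []) = "pass" := by
          unfold pvStatus; rw [if_neg (by rw [h1]; decide), if_neg (by rw [h2]; decide)]
        rw [if_neg (by rw [h1]; decide), if_neg (by rw [h2]; decide), ih]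
        simp [hb, hs]
        omega

theorem pvA_err (c m : String) (n : Int)
    (hg : PySem.Chars.isIn "error".toList (PySem.Chars.lower c.toList) = true) :
    parse_spec_test_results c m n =
      (((PySem.List.pyRange 0 n 1).countP
          (fun i => !pvBad ((pvMsgs c m).getD i [])) : Int),
       ((PySem.List.pyRange 0 n 1).countP
          (fun i => pvBad ((pvMsgs c m).getD i [])) : Int),
       ((PySem.List.pyRange 0 n 1).foldl
          (fun d i => d.insert i (pvStatus ((pvMsgs c m).getD i [])))
          (PySem.Dict.empty : PySem.Dict Int String)).items) := by
  unfold parse_spec_test_results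
  rw [hg]
  simp only [Bool.not_true]
  rw [if_neg (by decide : ¬ (false = true))]
  rw [pvA_fold]
  show ((0 : Int) + ((PySem.List.pyRange 0 n 1).countP
          (fun i => !pvBad ((pvMsgs c m).getD i [])) : Int),
        (0 : Int) + ((PySem.List.pyRange 0 n 1).countP
          (fun i => pvBad ((pvMsgs c m).getD i [])) : Int),
        ((PySem.List.pyRange 0 n 1).foldl
          (fun (d : PySem.Dict Int String) i => d.insert i (pvStatus ((pvMsgs c m).getD i [])))
          PySem.Dict.empty).items)
      = (((PySem.List.pyRange 0 n 1).countP
          (fun i => !pvBad ((pvMsgs c m).getD i [])) : Int),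
         ((PySem.List.pyRange 0 n 1).countP
          (fun i => pvBad ((pvMsgs c m).getD i [])) : Int),
         ((PySem.List.pyRange 0 n 1).foldl
          (fun (d : PySem.Dict Int String) i => d.insert i (pvStatus ((pvMsgs c m).getD i [])))
          PySem.Dict.empty).items)
  rw [zero_add, zero_add]

-- countP with predicates agreeing on every member
theorem pvCountP_congr {α : Type} (l : List α) (p q : α → Bool)
    (h : ∀ a ∈ l, p a = q a) : l.countP p = l.countP q := by
  induction l with
  | nil => rfl
  | cons x xs ih =>
    simp only [List.countP_cons, h x (by simp)]
    congr 1
    exact ih (fun a ha => h a (by simp [ha]))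

-- countP on a nodup list after changing the predicate at exactly one member
theorem pvCountP_update (R : List Int) (hnd : R.Nodup) (k : Int) (hk : k ∈ R)
    (g g' : Int → Bool) (hagree : ∀ i ∈ R, i ≠ k → g' i = g i) :
    (R.countP g' : Int) = (R.countP g : Int)
      - (if g k then 1 else 0) + (if g' k then 1 else 0) := by
  induction R with
  | nil => cases hk
  | cons x xs ih =>
    rw [List.nodup_cons] at hnd
    by_cases hx : x = k
    · subst hx
      have hcong : xs.countP g' = xs.countP g :=
        pvCountP_congr xs g' g (fun i hi =>
          hagree i (by simp [hi]) (fun h => hnd.1 (h ▸ hi)))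
      simp only [List.countP_cons, hcong]
      by_cases hgk : g x = true <;> by_cases hgk' : g' x = true <;>
        simp [hgk, hgk'] <;> push_cast <;> omega
    · have hmem : k ∈ xs := by
        cases hk with
        | head => exact absurd rfl hx
        | tail _ h => exact h
      have hgx : g' x = g x := hagree x (by simp) hx
      simp only [List.countP_cons, hgx]
      have hih := ih hnd.2 hmem (fun i hi hik => hagree i (by simp [hi]) hik)
      by_cases hg : g x = true <;> simp [hg] <;> push_cast at hih ⊢ <;> omega

-- B's single streaming pass, run in step with A's message-dict fold: after consuming the same
-- block list, B's dict looks up to the classification of A's last message per in-range index,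
-- and B's counter equals the number of in-range indices whose (current) last message is bad.
theorem pvStream_inv (n : Int) (em : List Char) (L : List (List Char))
    (d : PySem.Dict Int (List Char)) (s : PySem.Dict Int String) (f : Int)
    (h1 : ∀ i : Int, 0 ≤ i → i < n → s.get? i = (d.get? i).map pvStatus)
    (h2 : f = ((PySem.List.pyRange 0 n 1).countP (fun i => pvBad (d.getD i [])) : Int)) :
    (∀ i : Int, 0 ≤ i → i < n →
      (L.foldl (pvStepB n em) (s, f)).1.get? i
        = ((L.foldl (pvStepA em) d).get? i).map pvStatus) ∧
    (L.foldl (pvStepB n em) (s, f)).2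
      = ((PySem.List.pyRange 0 n 1).countP
          (fun i => pvBad ((L.foldl (pvStepA em) d).getD i [])) : Int) := by
  induction L generalizing d s f with
  | nil => exact ⟨fun i h0 hn => h1 i h0 hn, h2⟩
  | cons part L ih =>
    simp only [List.foldl_cons]
    by_cases hin : PySem.Chars.isIn em part = true
    · rw [show pvStepA em d part = pvUnpack2 (PySem.Chars.splitOnMax part em 1) d _ from by
          unfold pvStepA; rw [if_pos hin],
        show pvStepB n em (s, f) part = pvUnpack2 (PySem.Chars.splitOnMax part em 1) (s, f) _ from by
          unfold pvStepB; rw [if_pos hin]]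
      rcases hsp : PySem.Chars.splitOnMax part em 1 with _ | ⟨a, _ | ⟨b, _ | ⟨cc, t⟩⟩⟩
      · exact ih d s f h1 h2
      · exact ih d s f h1 h2
      · -- the [head, body] case
        simp only [pvUnpack2]
        rcases hoc : PySem.Int.ofChars? ((PySem.Chars.splitOn (PySem.Chars.strip a) [',']).headI)
          with _ | idx
        · simp only [Option.elim]
          exact ih d s f h1 h2
        · simp only [Option.elim]
          by_cases hrange : 0 ≤ idx ∧ idx < n
          · rw [if_pos hrange]
            refine ih (d.insert idx b) (s.insert idx (pvStatus b))
              (if pvStatus b != "pass"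
                then (if s.getD idx "pass" != "pass" then f - 1 else f) + 1
                else (if s.getD idx "pass" != "pass" then f - 1 else f)) ?_ ?_
            · intro i h0 hn
              by_cases hik : i = idx
              · subst hik
                rw [PySem.Dict.get?_insert_self, PySem.Dict.get?_insert_self]
                rfl
              · rw [PySem.Dict.get?_insert_of_ne _ _ hik, PySem.Dict.get?_insert_of_ne _ _ hik]
                exact h1 i h0 hn
            · have hks : s.getD idx "pass" = pvStatus (d.getD idx []) := by
                rw [PySem.Dict.getD_eq_get?_getD, PySem.Dict.getD_eq_get?_getD,
                    h1 idx hrange.1 hrange.2]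
                cases d.get? idx with
                | none => simp [pvStatus_nil]
                | some v => rfl
              have hupd := pvCountP_update (PySem.List.pyRange 0 n 1)
                (PySem.List.nodup_pyRange_one 0 n)
                idx (by rw [PySem.List.mem_pyRange_one]; exact hrange)
                (fun i => pvBad (d.getD i []))
                (fun i => pvBad ((d.insert idx b).getD i []))
                (fun i _ hik => by
                  show pvBad ((d.insert idx b).getD i []) = pvBad (d.getD i [])
                  rw [PySem.Dict.getD_insert_of_ne d b [] hik])
              beta_reduce at hupd
              rw [PySem.Dict.getD_insert_self] at hupd
              rw [hupd, hks, pvStatus_ne_pass, pvStatus_ne_pass, ← h2]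
              by_cases hb1 : pvBad (d.getD idx []) = true <;>
                by_cases hb2 : pvBad b = true <;> simp [hb1, hb2] <;> omega
          · rw [if_neg hrange]
            refine ih (d.insert idx b) s f ?_ ?_
            · intro i h0 hn
              have hik : i ≠ idx := fun h => hrange (h ▸ ⟨h0, hn⟩)
              rw [PySem.Dict.get?_insert_of_ne _ _ hik]
              exact h1 i h0 hn
            · rw [h2]
              refine congrArg Nat.cast (pvCountP_congr _ _ _ ?_)
              intro i hi
              have hik : i ≠ idx := by
                rw [PySem.List.mem_pyRange_one] at hi
                exact fun h => hrange (h ▸ ⟨hi.1, hi.2⟩)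
              show pvBad (d.getD i []) = pvBad ((d.insert idx b).getD i [])
              exact (congrArg pvBad (PySem.Dict.getD_insert_of_ne d b [] hik)).symm
      · exact ih d s f h1 h2
    · rw [Bool.not_eq_true] at hin
      rw [show pvStepA em d part = d from by unfold pvStepA; rw [hin]; rfl,
        show pvStepB n em (s, f) part = (s, f) from by unfold pvStepB; rw [hin]; rfl]
      exact ih d s f h1 h2

theorem pvCountSplit {α : Type} (p : α → Bool) (l : List α) :
    l.countP p + l.countP (fun a => !p a) = l.length := by
  induction l with
  | nil => simp
  | cons x xs ih =>
    by_cases h : p x = true <;> simp [h, ← ih] <;> omega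

theorem pvB_err (c m : String) (n : Int)
    (hg : PySem.Chars.isIn "error".toList (PySem.Chars.lower c.toList) = true) :
    parse_spec_test_results_alt c m n =
      (((PySem.List.pyRange 0 n 1).countP
          (fun i => !pvBad ((pvMsgs c m).getD i [])) : Int),
       ((PySem.List.pyRange 0 n 1).countP
          (fun i => pvBad ((pvMsgs c m).getD i [])) : Int),
       ((PySem.List.pyRange 0 n 1).foldl
          (fun d i => d.insert i (pvStatus ((pvMsgs c m).getD i [])))
          (PySem.Dict.empty : PySem.Dict Int String)).items) := by
  obtain ⟨hget, hcnt⟩ := pvStream_inv n ('<' :: '/' :: (m.toList ++ ['>']))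
    ((PySem.Chars.splitOn c.toList ('<' :: (m.toList ++ ['>']))).drop 1)
    PySem.Dict.empty PySem.Dict.empty 0
    (fun i _ _ => by rw [PySem.Dict.get?_empty, PySem.Dict.get?_empty]; rfl)
    (by
      have hp : (fun i : Int => pvBad ((PySem.Dict.empty : PySem.Dict Int (List Char)).getD i []))
          = fun _ => false := funext fun i => by
        rw [PySem.Dict.getD_eq_get?_getD, PySem.Dict.get?_empty]; exact pvBad_nil
      rw [hp]; simp)
  rw [show (((PySem.Chars.splitOn c.toList ('<' :: (m.toList ++ ['>']))).drop 1).foldl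
      (pvStepA ('<' :: '/' :: (m.toList ++ ['>']))) PySem.Dict.empty) = pvMsgs c m from rfl]
    at hget hcnt
  set st := ((PySem.Chars.splitOn c.toList ('<' :: (m.toList ++ ['>']))).drop 1).foldl
    (pvStepB n ('<' :: '/' :: (m.toList ++ ['>'])))
    ((PySem.Dict.empty : PySem.Dict Int String), (0 : Int)) with hst
  have hfold : (PySem.List.pyRange 0 n 1).foldl
      (fun (d : PySem.Dict Int String) i => d.insert i (st.1.getD i "pass")) PySem.Dict.empty
      = (PySem.List.pyRange 0 n 1).foldl
        (fun d i => d.insert i (pvStatus ((pvMsgs c m).getD i []))) PySem.Dict.empty := by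
    apply PySem.List.foldl_congr_mem
    intro acc i hi
    rw [PySem.List.mem_pyRange_one] at hi
    rw [PySem.Dict.getD_eq_get?_getD, hget i hi.1 hi.2, PySem.Dict.getD_eq_get?_getD]
    cases (pvMsgs c m).get? i with
    | none => simp [pvStatus_nil]
    | some v => rfl
  have hitems' := PySem.Dict.items_foldl_insert_fresh (PySem.List.pyRange 0 n 1)
    (fun i => i) (fun i => pvStatus ((pvMsgs c m).getD i []))
    (PySem.Dict.empty : PySem.Dict Int String)
    (fun a _ => PySem.Dict.contains_empty a)
    (by simpa using PySem.List.nodup_pyRange_one 0 n)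
  have hsize : ((PySem.List.pyRange 0 n 1).foldl
      (fun (d : PySem.Dict Int String) i => d.insert i (pvStatus ((pvMsgs c m).getD i [])))
      PySem.Dict.empty).size = (PySem.List.pyRange 0 n 1).length := by
    show ((PySem.List.pyRange 0 n 1).foldl
      (fun (d : PySem.Dict Int String) i => d.insert i (pvStatus ((pvMsgs c m).getD i [])))
      PySem.Dict.empty).items.length = _
    rw [show ((PySem.Dict.empty : PySem.Dict Int String)).items = [] from rfl] at hitems'
    simp [hitems']
  have hsplit := pvCountSplit (fun i => pvBad ((pvMsgs c m).getD i []))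
    (PySem.List.pyRange 0 n 1)
  unfold parse_spec_test_results_alt
  rw [hg]
  simp only [Bool.not_true]
  rw [if_neg (by decide : ¬ (false = true))]
  show (((((PySem.List.pyRange 0 n 1).foldl
        (fun (d : PySem.Dict Int String) i => d.insert i (st.1.getD i "pass"))
        PySem.Dict.empty).size : Int) - st.2, st.2,
      ((PySem.List.pyRange 0 n 1).foldl
        (fun (d : PySem.Dict Int String) i => d.insert i (st.1.getD i "pass"))
        PySem.Dict.empty).items) : Int × Int × List (Int × String)) = _
  rw [hfold, hcnt, hsize]
  have harith : (((PySem.List.pyRange 0 n 1).length : Int)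
      - ((PySem.List.pyRange 0 n 1).countP (fun i => pvBad ((pvMsgs c m).getD i [])) : Int))
      = ((PySem.List.pyRange 0 n 1).countP (fun i => !pvBad ((pvMsgs c m).getD i [])) : Int) := by
    omega
  rw [harith]

-- ===== VERDICT (by name: the statement is the Claim_ definition above) =====
theorem parse_spec_test_results_spec : Claim_equal_parse_spec_test_results := by
  intro compile_output marker num_tests _
  unfold Spec_parse_spec_test_results
  by_cases hg : PySem.Chars.isIn "error".toList (PySem.Chars.lower compile_output.toList) = true
  · rw [pvA_err compile_output marker num_tests hg, pvB_err compile_output marker num_tests hg]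
  · rw [Bool.not_eq_true] at hg
    unfold parse_spec_test_results parse_spec_test_results_alt
    rw [hg]
    rfl
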